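-- pv_equiv track=rewrite | github.com/shaileshdesai31/NewMusicReleases | new-music-checker.py | format_artists
-- ===== SOURCE A (Python) =====
-- def format_artists(artists: []) -> str:
--     a_name = ''
--     for i in range(len(artists)):
--         name = artists[i]['name']
--         if i == 0:
--             a_name += name
--         elif i == len(artists) - 1:
--             a_name += ' & ' + name
--         else:
--             a_name += ', ' + name
--     return a_name
-- ===== SOURCE B (Python) =====
-- def format_artists(artists: []) -> str:
--     names = [a['name'] for a in artists]
--     if not names:
--         return ''
--     if len(names) == 1:
--         return names[0]
--     return ', '.join(names[:-1]) + ' & ' + names[-1]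
-- ===== Notes on version B (the rewrite author's own statement) =====
-- stated objective: simpler
-- what changed: Replaces the index loop with per-position branching by extracting the name list once and composing the result from two shaped pieces: a ', '-join of the prefix and the last name appended with ' & '.
import Mathlib
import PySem

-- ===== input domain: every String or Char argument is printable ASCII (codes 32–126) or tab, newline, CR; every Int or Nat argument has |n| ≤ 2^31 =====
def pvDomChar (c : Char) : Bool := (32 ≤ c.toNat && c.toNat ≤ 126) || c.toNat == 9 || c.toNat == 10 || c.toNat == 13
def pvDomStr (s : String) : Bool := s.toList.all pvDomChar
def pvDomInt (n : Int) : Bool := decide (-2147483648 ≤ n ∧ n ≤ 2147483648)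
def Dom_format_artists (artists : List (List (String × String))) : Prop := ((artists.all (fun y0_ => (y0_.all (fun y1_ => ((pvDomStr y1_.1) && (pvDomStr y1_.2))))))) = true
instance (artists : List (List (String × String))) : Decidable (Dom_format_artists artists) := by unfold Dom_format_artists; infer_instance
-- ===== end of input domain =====

-- B is a simpler decomposition: extract the name list once, then build the result as
-- ', '-joined prefix plus ' & ' plus the last name, instead of branching on the index inside a loop.

-- ===== PORT A =====
-- d['name'] raises KeyError when missing; Pre_ excludes that, so the getD default is never reached.
def pvLookupName (d : List (String × String)) : String :=
  ((PySem.Dict.mk d).get? "name").getD ""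

-- the loop body of A, one helper per Python statement block
def pvStep (artists : List (List (String × String))) (a_name : String) (i : Int) : String :=
  let name := pvLookupName (PySem.List.pyGetD artists i [])
  if i = 0 then a_name ++ name
  else if i = (artists.length : Int) - 1 then a_name ++ (" & " ++ name)
  else a_name ++ (", " ++ name)

def format_artists (artists : List (List (String × String))) : String :=
  (PySem.List.pyRange 0 artists.length 1).foldl (pvStep artists) ""

-- ===== PORT B =====
def format_artists_alt (artists : List (List (String × String))) : String :=
  let names := artists.map pvLookupName
  match names with
  | [] => ""
  | [n] => n
  | _ =>
      PySem.Str.join ", " (PySem.List.slice names none (some (-1)))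
        ++ (" & " ++ PySem.List.pyGetD names (-1) "")

-- ===== PRECONDITION & SPEC =====
-- Pre_ excludes exactly the inputs on which Python A raises KeyError: some artist dict lacks the key "name".
def Pre_format_artists (artists : List (List (String × String))) : Prop :=
  ∀ d ∈ artists, (PySem.Dict.mk d).contains "name" = true
instance (artists : List (List (String × String))) : Decidable (Pre_format_artists artists) := by unfold Pre_format_artists; infer_instance
def pvWitness_format_artists : (List (List (String × String))) := [[("name", "Alice")], [("name", "Bob")]]

def Spec_format_artists (artists : List (List (String × String))) (out : String) : Prop := out = format_artists_alt artists
instance (artists : List (List (String × String))) (out : String) : Decidable (Spec_format_artists artists out) := by unfold Spec_format_artists; infer_instance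

-- ===== CLAIM (what is proved, stated in full; the proofs are below) =====
def Claim_equal_format_artists : Prop := ∀ (artists : List (List (String × String))), Dom_format_artists artists → Pre_format_artists artists → Spec_format_artists artists (format_artists artists)

-- ===== LEMMAS AND PROOFS =====

-- The tail of A's result after the first name: each later name is preceded by ", ",
-- except the last, preceded by " & ".
def pvMid : List String → String
  | [] => ""
  | [x] => " & " ++ x
  | x :: y :: rest => (", " ++ x) ++ pvMid (y :: rest)

theorem pvLoop (artists : List (List (String × String))) (k : Nat) (hk : 1 ≤ k)
    (hkL : k ≤ artists.length) (acc : String) :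
    (PySem.List.pyRange (k : Int) artists.length 1).foldl (pvStep artists) acc
    = acc ++ pvMid ((artists.drop k).map pvLookupName) := by
  induction hgen : artists.length - k generalizing k acc with
  | zero =>
      have hkL' : k = artists.length := by omega
      subst hkL'
      rw [PySem.List.pyRange_one_eq_nil (by omega)]
      simp [List.drop_length, pvMid]
  | succ m ih =>
      have hlt : (k : Int) < artists.length := by omega
      rw [PySem.List.pyRange_one_cons hlt, List.foldl_cons]
      have hne0 : (k : Int) ≠ 0 := by omega
      have hdrop : artists.drop k = artists[k] :: artists.drop (k + 1) :=
        List.drop_eq_getElem_cons (by omega)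
      have hget : PySem.List.pyGetD artists (k : Int) [] = artists[k] := by
        rw [PySem.List.pyGetD_natCast]; exact List.getD_eq_getElem _ _ _
      by_cases hlast : (k : Int) = (artists.length : Int) - 1
      · have hkeq : k + 1 = artists.length := by omega
        rw [show ((k : Int) + 1) = ((k + 1 : Nat) : Int) by push_cast; ring, hkeq,
          PySem.List.pyRange_one_eq_nil (by omega), List.foldl_nil]
        have hdropnil : artists.drop (k + 1) = [] := by
          rw [hkeq]; exact List.drop_length
        rw [pvStep, if_neg hne0, if_pos hlast, hget, hdrop, hdropnil]
        simp [pvMid]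
      · have hklt2 : k + 1 < artists.length := by
          rcases Nat.lt_or_ge (k+1) artists.length with h | h
          · exact h
          · exfalso; apply hlast; omega
        rw [show ((k : Int) + 1) = ((k + 1 : Nat) : Int) by push_cast; ring]
        rw [ih (k + 1) (by omega) (by omega) _ (by omega)]
        rw [pvStep, if_neg hne0, if_neg hlast, hget, hdrop]
        have hdrop2 : artists.drop (k + 1) = artists[k+1] :: artists.drop (k + 2) :=
          List.drop_eq_getElem_cons (by omega)
        rw [hdrop2]
        simp only [List.map_cons, pvMid, String.append_assoc]

theorem pvJoinLast (x : String) (rest : List String) (h : rest ≠ []) :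
    x ++ pvMid rest
      = PySem.Str.join ", " ((x :: rest).dropLast)
          ++ (" & " ++ PySem.List.pyGetD (x :: rest) (-1) "") := by
  induction rest generalizing x with
  | nil => exact absurd rfl h
  | cons y t ih =>
      cases t with
      | nil =>
          apply String.toList_inj.mp
          simp [pvMid, PySem.Str.join, PySem.Chars.join, List.intercalate,
            PySem.List.pyGetD, PySem.List.pyGet?_neg_one]
      | cons z t' =>
          have hrec := ih y (by simp)
          apply String.toList_inj.mp
          have hlast : PySem.List.pyGetD (x :: y :: z :: t') (-1) ""
              = PySem.List.pyGetD (y :: z :: t') (-1) "" := by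
            simp [PySem.List.pyGetD, PySem.List.pyGet?_neg_one, List.getLast?_cons_cons]
          rw [pvMid, hlast]
          have : (x :: y :: z :: t').dropLast = x :: (y :: z :: t').dropLast := by
            simp [List.dropLast_cons_of_ne_nil]
          rw [this]
          have hjoin : PySem.Str.join ", " (x :: (y :: z :: t').dropLast)
              = x ++ ", " ++ PySem.Str.join ", " ((y :: z :: t').dropLast) := by
            have : (y :: z :: t').dropLast = y :: (z :: t').dropLast := by
              simp [List.dropLast_cons_of_ne_nil]
            rw [this]
            apply String.toList_inj.mp
            simp [PySem.Str.join, PySem.Chars.join_cons_cons]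
          rw [hjoin]
          have hrl := congrArg String.toList hrec
          simp only [String.toList_append] at hrl ⊢
          rw [List.append_assoc, hrl]
          simp [List.append_assoc]

-- ===== VERDICT (by name: the statement is the Claim_ definition above) =====
theorem format_artists_spec : Claim_equal_format_artists := by
  intro artists _ _
  unfold Spec_format_artists format_artists format_artists_alt
  cases artists with
  | nil => simp [PySem.List.pyRange_one_eq_nil]
  | cons a0 rest =>
      have h01 : (0 : Int) < ((a0 :: rest).length : Int) := by simp
      rw [PySem.List.pyRange_one_cons h01, List.foldl_cons]
      have hstep0 : pvStep (a0 :: rest) "" 0 = pvLookupName a0 := by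
        rw [pvStep, if_pos rfl]
        simp [PySem.List.pyGetD_zero_cons]
      rw [hstep0]
      rw [show (0 : Int) + 1 = ((1 : Nat) : Int) by norm_num]
      rw [pvLoop (a0 :: rest) 1 (by omega) (by simp) _]
      cases rest with
      | nil => simp [pvMid]
      | cons a1 t =>
          simp only [List.drop_one, List.tail_cons, List.map_cons]
          rw [pvJoinLast (pvLookupName a0) (pvLookupName a1 :: t.map pvLookupName) (by simp)]
          simp [PySem.List.slice_to_neg_one]
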